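-- pv_equiv track=rewrite | github.com/oleksandrmelnychenko/bi-server-concord | db-ai-api/training_data/variations/transformers/typo_corrector.py | _fix_extra_chars
-- ===== SOURCE A (Python) =====
-- from typing import List, Dict, Set
--
-- def _fix_extra_chars(word: str, known_words: Set[str]) -> List[str]:
--     """Try removing extra characters."""
--     results = []
--     # Find known words that are 1 char shorter
--     for known in known_words:
--         if len(known) == len(word) - 1:
--             # Check if known is word with 1 char removed
--             for i in range(len(word)):
--                 if word[:i] + word[i + 1:] == known:
--                     results.append(known)
--                     break
--     return results[:3]
-- ===== SOURCE B (Python) =====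
-- def _fix_extra_chars(word, known_words):
--     """Try removing extra characters: for each known word of the right length, do one
--     linear first-mismatch scan and a single suffix comparison instead of trying every
--     deletion position; stop as soon as 3 results are found."""
--     target = len(word) - 1
--     results = []
--     for known in known_words:
--         if len(known) == target:
--             j = 0
--             while j < target and word[j] == known[j]:
--                 j += 1
--             if word[j + 1:] == known[j:]:
--                 results.append(known)
--                 if len(results) == 3:
--                     break
--     return results
-- ===== Notes on version B (the rewrite author's own statement) =====
-- stated objective: alternative
-- what changed: A tests each candidate by building and comparing every possible single-deletion string of the word; B instead does one first-mismatch scan plus a single suffix comparison per candidate and stops as soon as 3 results are found (measured ~1.4x at the largest timing size, below the 1.5x bar, so no speed is claimed).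
import Mathlib
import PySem

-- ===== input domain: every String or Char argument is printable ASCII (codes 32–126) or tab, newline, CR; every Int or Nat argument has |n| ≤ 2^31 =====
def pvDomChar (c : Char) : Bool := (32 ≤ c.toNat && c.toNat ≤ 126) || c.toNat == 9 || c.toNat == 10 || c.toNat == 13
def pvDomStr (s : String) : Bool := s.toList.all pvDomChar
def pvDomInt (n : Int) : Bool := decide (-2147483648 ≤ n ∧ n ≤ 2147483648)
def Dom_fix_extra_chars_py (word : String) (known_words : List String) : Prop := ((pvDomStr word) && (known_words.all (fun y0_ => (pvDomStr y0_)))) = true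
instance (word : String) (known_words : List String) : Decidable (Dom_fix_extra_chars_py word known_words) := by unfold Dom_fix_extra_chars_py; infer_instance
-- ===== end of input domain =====

-- B replaces A's inner try-every-deletion-position scan by one first-mismatch scan
-- plus a single suffix comparison per candidate, and stops as soon as 3 results are found.

-- ===== PORT A =====
-- word[:i] + word[i+1:]  (A's inner-loop expression, on the char list)
def pvDelA (cs : List Char) (i : Int) : List Char :=
  PySem.List.slice cs none (some i) ++ PySem.List.slice cs (some (i + 1)) none

-- the inner 'for i in range(len(word)): … break' loop: true iff some i appended
def pvInnerA (cs : List Char) (known : List Char) : List Int → Bool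
  | [] => false
  | i :: rest => if pvDelA cs i = known then true else pvInnerA cs known rest

def fix_extra_chars_py (word : String) (known_words : List String) : List String :=
  let cs := word.toList
  let results := known_words.foldl (fun results known =>
    if (known.toList.length : Int) = (cs.length : Int) - 1 then
      if pvInnerA cs known.toList (PySem.List.pyRange 0 (cs.length : Int) 1) then
        results ++ [known]
      else results
    else results) []
  PySem.List.slice results none (some 3)

-- ===== PORT B =====
-- Source B's 'while j < target and word[j] == known[j]: j += 1' (guard len(known) = target:
-- the loop stops exactly when known is exhausted or the characters differ)
def pvPrefLenB : List Char → List Char → Nat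
  | c :: cs, k :: ks => if c = k then pvPrefLenB cs ks + 1 else 0
  | _, _ => 0

-- Source B's main loop, with the 'if len(results) == 3: break' early exit
def pvLoopB (cs : List Char) (target : Int) (knowns : List String) (results : List String) : List String :=
  match knowns with
  | [] => results
  | known :: rest =>
      if (known.toList.length : Int) = target then
        let j := pvPrefLenB cs known.toList
        if PySem.List.slice cs (some ((j : Int) + 1)) none
            = PySem.List.slice known.toList (some (j : Int)) none then
          let results' := results ++ [known]
          if results'.length = 3 then results' else pvLoopB cs target rest results'
        else pvLoopB cs target rest results
      else pvLoopB cs target rest results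

def fix_extra_chars_py_alt (word : String) (known_words : List String) : List String :=
  pvLoopB word.toList ((word.toList.length : Int) - 1) known_words []

-- ===== PRECONDITION & SPEC =====
def Spec_fix_extra_chars_py (word : String) (known_words : List String) (out : List String) : Prop := out = fix_extra_chars_py_alt word known_words
instance (word : String) (known_words : List String) (out : List String) : Decidable (Spec_fix_extra_chars_py word known_words out) := by unfold Spec_fix_extra_chars_py; infer_instance

-- ===== CLAIM (what is proved, stated in full; the proofs are below) =====
def Claim_equal_fix_extra_chars_py : Prop := ∀ (word : String) (known_words : List String), Dom_fix_extra_chars_py word known_words → Spec_fix_extra_chars_py word known_words (fix_extra_chars_py word known_words)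

-- ===== LEMMAS AND PROOFS =====

-- the per-element test shared by both reductions (B's form, as a Bool predicate)
def pvTestB (cs : List Char) (target : Int) (known : String) : Bool :=
  decide ((known.toList.length : Int) = target)
    && decide (cs.drop (pvPrefLenB cs known.toList + 1)
        = known.toList.drop (pvPrefLenB cs known.toList))

theorem pvPrefLenB_cons_eq (c : Char) (cs ks : List Char) :
    pvPrefLenB (c :: cs) (c :: ks) = pvPrefLenB cs ks + 1 := by simp [pvPrefLenB]

theorem pvPrefLenB_cons_ne (c k : Char) (cs ks : List Char) (h : c ≠ k) :
    pvPrefLenB (c :: cs) (k :: ks) = 0 := by simp [pvPrefLenB, h]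

-- A's inner loop is an existence test over the index list
theorem pvInnerA_eq_true_iff (cs known : List Char) (ids : List Int) :
    pvInnerA cs known ids = true ↔ ∃ i ∈ ids, pvDelA cs i = known := by
  induction ids with
  | nil => simp [pvInnerA]
  | cons i rest ih =>
      by_cases h : pvDelA cs i = known <;> simp [pvInnerA, h, ih]

-- the deletion expression, on a natural index
theorem pvDelA_natCast (cs : List Char) (n : Nat) :
    pvDelA cs (n : Int) = cs.take n ++ cs.drop (n + 1) := by
  rw [pvDelA, show ((n : Int) + 1) = ((n + 1 : Nat) : Int) by push_cast; ring]
  rw [PySem.List.slice_to_natCast, PySem.List.slice_from_natCast]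

-- core: "some single deletion of cs gives ks" ↔ B's suffix comparison at the first mismatch
theorem pvExists_del_iff (cs ks : List Char) (hlen : cs.length = ks.length + 1) :
    (∃ n : Nat, n < cs.length ∧ cs.take n ++ cs.drop (n + 1) = ks)
      ↔ cs.drop (pvPrefLenB cs ks + 1) = ks.drop (pvPrefLenB cs ks) := by
  induction cs generalizing ks with
  | nil => simp at hlen
  | cons c cs' ih =>
      cases ks with
      | nil =>
          -- cs = [c]: deleting the only char works; pvPrefLenB = 0, both sides true
          have hc : cs' = [] := List.eq_nil_of_length_eq_zero (by simpa using hlen)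
          subst hc
          exact iff_of_true ⟨0, by simp, by simp⟩ (by simp [pvPrefLenB])
      | cons k ks' =>
          have hlen' : cs'.length = ks'.length + 1 := by
            simp only [List.length_cons] at hlen; omega
          by_cases hck : c = k
          · -- heads equal: both sides reduce to the tails
            subst hck
            rw [pvPrefLenB_cons_eq, List.drop_succ_cons, List.drop_succ_cons,
              ← ih ks' hlen']
            constructor
            · rintro ⟨n, hn, hdel⟩
              cases n with
              | zero =>
                  -- deleting the head: cs' = c :: ks', so deleting cs''s head also works
                  simp only [List.take_zero, List.drop_succ_cons, List.drop_zero,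
                    List.nil_append] at hdel
                  subst hdel
                  exact ⟨0, by simp, by simp⟩
              | succ m =>
                  simp only [List.take_succ_cons, List.drop_succ_cons, List.cons_append,
                    List.cons.injEq] at hdel
                  exact ⟨m, by simp only [List.length_cons] at hn; omega, hdel.2⟩
            · rintro ⟨n, hn, hdel⟩
              exact ⟨n + 1, by simp only [List.length_cons]; omega,
                by simp [List.take_succ_cons, hdel]⟩
          · -- heads differ: only deleting the head can work, j = 0
            rw [pvPrefLenB_cons_ne c k cs' ks' hck, zero_add, List.drop_one,
              List.drop_zero, List.tail_cons]
            constructor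
            · rintro ⟨n, hn, hdel⟩
              cases n with
              | zero => simpa using hdel
              | succ m =>
                  exfalso
                  simp only [List.take_succ_cons, List.cons_append, List.cons.injEq] at hdel
                  exact hck hdel.1
            · intro h
              exact ⟨0, by simp, by simpa using h⟩
  
-- A's per-element test equals B's
theorem pvTestA_eq_testB (cs : List Char) (known : String) :
    (if (known.toList.length : Int) = (cs.length : Int) - 1 then
      pvInnerA cs known.toList (PySem.List.pyRange 0 (cs.length : Int) 1) else false)
      = pvTestB cs ((cs.length : Int) - 1) known := by
  by_cases hlen : (known.toList.length : Int) = (cs.length : Int) - 1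
  · have hl : cs.length = known.toList.length + 1 := by omega
    rw [if_pos hlen,
      show pvTestB cs ((cs.length : Int) - 1) known
        = decide (cs.drop (pvPrefLenB cs known.toList + 1)
            = known.toList.drop (pvPrefLenB cs known.toList)) from by
        simp only [pvTestB, decide_eq_true hlen, Bool.true_and]]
    rw [Bool.eq_iff_iff, pvInnerA_eq_true_iff, decide_eq_true_iff,
      ← pvExists_del_iff cs known.toList hl]
    constructor
    · rintro ⟨i, hi, hdel⟩
      rw [PySem.List.mem_pyRange_one] at hi
      obtain ⟨n, rfl⟩ := Int.eq_ofNat_of_zero_le hi.1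
      exact ⟨n, by exact_mod_cast hi.2, by rw [← pvDelA_natCast]; exact hdel⟩
    · rintro ⟨n, hn, hdel⟩
      exact ⟨(n : Int), PySem.List.mem_pyRange_one.mpr ⟨by positivity, by exact_mod_cast hn⟩,
        by rw [pvDelA_natCast]; exact hdel⟩
  · rw [if_neg hlen]
    symm
    simp only [pvTestB, decide_eq_false hlen, Bool.false_and]

-- B's loop collects the first 3 elements passing the test
theorem pvLoopB_eq_take (cs : List Char) (knowns : List String) (results : List String)
    (h3 : results.length < 3) :
    pvLoopB cs ((cs.length : Int) - 1) knowns results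
      = results ++ (knowns.filter (pvTestB cs ((cs.length : Int) - 1))).take (3 - results.length) := by
  induction knowns generalizing results with
  | nil => simp [pvLoopB]
  | cons known rest ih =>
      rw [pvLoopB]
      simp only [List.filter_cons]
      by_cases h1 : (known.toList.length : Int) = (cs.length : Int) - 1
      · by_cases h2 : cs.drop (pvPrefLenB cs known.toList + 1)
            = known.toList.drop (pvPrefLenB cs known.toList)
        · have hslice : PySem.List.slice cs (some ((pvPrefLenB cs known.toList : Int) + 1)) none
              = PySem.List.slice known.toList (some ((pvPrefLenB cs known.toList : Int))) none := by
            rw [show ((pvPrefLenB cs known.toList : Int) + 1)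
                = ((pvPrefLenB cs known.toList + 1 : Nat) : Int) by push_cast; ring]
            rw [PySem.List.slice_from_natCast, PySem.List.slice_from_natCast]
            exact h2
          have htest : pvTestB cs ((cs.length : Int) - 1) known = true := by
            simp only [pvTestB, decide_eq_true h1, decide_eq_true h2, Bool.and_self]
          simp only [if_pos h1, if_pos hslice, htest, if_true]
          by_cases hfull : (results ++ [known]).length = 3
          · have : results.length = 2 := by simp at hfull; omega
            simp [this]
          · have hlt : (results ++ [known]).length < 3 := by
              simp only [List.length_append, List.length_cons, List.length_nil] at hfull ⊢
              omega
            rw [if_neg hfull, ih _ hlt]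
            have : 3 - results.length = (3 - (results ++ [known]).length) + 1 := by
              simp only [List.length_append, List.length_cons, List.length_nil]
              omega
            rw [this, List.take_succ_cons]
            simp
        · have hslice : ¬ (PySem.List.slice cs (some ((pvPrefLenB cs known.toList : Int) + 1)) none
              = PySem.List.slice known.toList (some ((pvPrefLenB cs known.toList : Int))) none) := by
            rw [show ((pvPrefLenB cs known.toList : Int) + 1)
                = ((pvPrefLenB cs known.toList + 1 : Nat) : Int) by push_cast; ring]
            rw [PySem.List.slice_from_natCast, PySem.List.slice_from_natCast]
            exact h2
          have htest : pvTestB cs ((cs.length : Int) - 1) known = false := by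
            simp only [pvTestB, decide_eq_false h2, Bool.and_false]
          simp only [if_pos h1, if_neg hslice, htest, Bool.false_eq_true, if_false]
          exact ih _ h3
      · have htest : pvTestB cs ((cs.length : Int) - 1) known = false := by
          simp only [pvTestB, decide_eq_false h1, Bool.false_and]
        simp only [if_neg h1, htest, Bool.false_eq_true, if_false]
        exact ih _ h3

-- ===== VERDICT (by name: the statement is the Claim_ definition above) =====
theorem fix_extra_chars_py_spec : Claim_equal_fix_extra_chars_py := by
  intro word known_words _
  unfold Spec_fix_extra_chars_py fix_extra_chars_py fix_extra_chars_py_alt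
  simp only
  rw [pvLoopB_eq_take word.toList known_words [] (by simp)]
  have hfun : (fun (results : List String) (known : String) =>
      if (known.toList.length : Int) = (word.toList.length : Int) - 1 then
        if pvInnerA word.toList known.toList (PySem.List.pyRange 0 (word.toList.length : Int) 1) then
          results ++ [known]
        else results
      else results)
      = (fun results known =>
          if pvTestB word.toList ((word.toList.length : Int) - 1) known then results ++ [known]
          else results) := by
    funext results known
    rw [← pvTestA_eq_testB word.toList known]
    split_ifs <;> simp_all
  rw [hfun, PySem.List.foldl_append_if_eq_filter, List.nil_append, List.nil_append]
  rw [show (3 : Int) = ((3 : Nat) : Int) by norm_num, PySem.List.slice_to_natCast]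
  simp
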